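-- pv_equiv track=rewrite | github.com/kimkimgim/Algorithm_and_Learning | 프로그래머스/2/42586. 기능개발/기능개발.py | solution
-- ===== SOURCE A (Python) =====
-- import math
--
-- def solution(progresses, speeds):
--     answer = []
--
--     # 진도100%까지 걸리는 기간
--     duration = []
--     for i in range(len(progresses)):
--         per = math.ceil((100 - progresses[i]) / speeds[i])
--         duration.append(per)
--
--     # 앞에 번호와 비교
--     count = 0
--     i = 1
--     while i < len(duration):
--         if duration[i-1] >= duration[i]:
--             count += 1
--             duration.pop(i)
--
--         elif duration[i-1] < duration[i]:
--             count += 1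
--             answer.append(count)
--             duration.pop(i-1)
--             count = 0
--             pass
--
--     if len(duration) == 1:
--         count +=1
--         answer.append(count)
--
--
--     return answer
-- ===== SOURCE B (Python) =====
-- def solution(progresses, speeds):
--     answer = []
--     leader = 0
--     count = 0
--     for p, s in zip(progresses, speeds):
--         d = -((p - 100) // s)  # exact ceil((100-p)/s)
--         if count != 0 and d <= leader:
--             count += 1
--         else:
--             if count != 0:
--                 answer.append(count)
--             leader = d
--             count = 1
--     if count != 0:
--         answer.append(count)
--     return answer
-- ===== Notes on version B (the rewrite author's own statement) =====
-- stated objective: faster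
-- what changed: Replaced A's quadratic while-loop that repeatedly pops duration[0]/duration[1] from the front of the list by a single forward pass over zip(progresses, speeds) tracking the current group leader's duration and a group counter (durations computed with exact integer ceiling division instead of float math.ceil).
import Mathlib
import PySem

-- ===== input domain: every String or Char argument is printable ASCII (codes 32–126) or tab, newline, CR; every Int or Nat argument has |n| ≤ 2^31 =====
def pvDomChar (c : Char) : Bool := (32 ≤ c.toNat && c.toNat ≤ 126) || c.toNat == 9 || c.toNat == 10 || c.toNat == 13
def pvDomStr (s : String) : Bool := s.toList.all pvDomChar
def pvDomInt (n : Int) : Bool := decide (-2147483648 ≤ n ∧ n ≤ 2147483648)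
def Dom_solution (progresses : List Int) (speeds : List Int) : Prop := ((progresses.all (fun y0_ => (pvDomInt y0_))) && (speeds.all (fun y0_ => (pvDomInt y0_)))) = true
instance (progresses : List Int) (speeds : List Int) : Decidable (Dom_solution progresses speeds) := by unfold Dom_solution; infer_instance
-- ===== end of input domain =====

-- B replaces A's quadratic pop-from-the-front while loop by a single forward pass that
-- tracks the current group leader's duration and the size of the current group (faster).

-- ===== PORT A =====
-- A's while loop: i stays 1; compares duration[0] with duration[1], popping one of them.
-- Recursion on the duration list; the trailing 'if len(duration) == 1' is the base case.
def solutionWhile : List Int → Int → List Int → List Int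
  | d0 :: d1 :: rest, count, answer =>
      if d0 ≥ d1 then solutionWhile (d0 :: rest) (count + 1) answer
      else solutionWhile (d1 :: rest) 0 (answer ++ [count + 1])
  | [_], count, answer => answer ++ [count + 1]
  | [], _, answer => answer

-- math.ceil((100 - p) / s) ported as the exact integer ceiling -((p - 100) // s);
-- on Dom (|ints| ≤ 2^31) the float computation is exact, so this is faithful.
def solution (progresses : List Int) (speeds : List Int) : List Int :=
  let duration := (PySem.List.pyRange 0 progresses.length 1).foldl
    (fun acc i =>
      acc ++ [-(PySem.Int.floordiv (PySem.List.pyGetD progresses i 0 - 100)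
                                   (PySem.List.pyGetD speeds i 0))]) []
  solutionWhile duration 0 []

-- ===== PORT B =====
def solution_alt (progresses : List Int) (speeds : List Int) : List Int :=
  let st := (progresses.zip speeds).foldl
    (fun st ps =>
      let d := -(PySem.Int.floordiv (ps.1 - 100) ps.2)
      if st.2.2 ≠ 0 ∧ d ≤ st.2.1 then (st.1, st.2.1, st.2.2 + 1)
      else ((if st.2.2 ≠ 0 then st.1 ++ [st.2.2] else st.1), d, 1))
    ([], 0, 0)
  if st.2.2 ≠ 0 then st.1 ++ [st.2.2] else st.1

-- ===== PRECONDITION & SPEC =====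
-- Pre_ excludes exactly the inputs on which Python A raises: an index error when
-- speeds is shorter than progresses, and a ZeroDivisionError on a used zero speed.
def Pre_solution (progresses : List Int) (speeds : List Int) : Prop :=
  progresses.length ≤ speeds.length ∧ ∀ s ∈ speeds.take progresses.length, s ≠ 0

instance (progresses : List Int) (speeds : List Int) : Decidable (Pre_solution progresses speeds) := by unfold Pre_solution; infer_instance

def pvWitness_solution : List Int × List Int := ([93, 30, 55], [1, 30, 5])

def Spec_solution (progresses : List Int) (speeds : List Int) (out : List Int) : Prop := out = solution_alt progresses speeds
instance (progresses : List Int) (speeds : List Int) (out : List Int) : Decidable (Spec_solution progresses speeds out) := by unfold Spec_solution; infer_instance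

-- ===== CLAIM (what is proved, stated in full; the proofs are below) =====
def Claim_equal_solution : Prop := ∀ (progresses : List Int) (speeds : List Int), Dom_solution progresses speeds → Pre_solution progresses speeds → Spec_solution progresses speeds (solution progresses speeds)

-- ===== LEMMAS AND PROOFS =====

-- B's loop body, factored over the computed duration value.
def bStep (st : List Int × Int × Int) (d : Int) : List Int × Int × Int :=
  if st.2.2 ≠ 0 ∧ d ≤ st.2.1 then (st.1, st.2.1, st.2.2 + 1)
  else ((if st.2.2 ≠ 0 then st.1 ++ [st.2.2] else st.1), d, 1)

def bFinish (st : List Int × Int × Int) : List Int :=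
  if st.2.2 ≠ 0 then st.1 ++ [st.2.2] else st.1

def dcalc (ps : Int × Int) : Int := -(PySem.Int.floordiv (ps.1 - 100) ps.2)

lemma solution_alt_eq (p s : List Int) :
    solution_alt p s = bFinish (((p.zip s).map dcalc).foldl bStep ([], 0, 0)) := by
  rw [List.foldl_map]
  rfl

lemma key (ds : List Int) : ∀ (ℓ count : Int) (answer : List Int), 0 ≤ count →
    solutionWhile (ℓ :: ds) count answer = bFinish (ds.foldl bStep (answer, ℓ, count + 1)) := by
  induction ds with
  | nil =>
      intro ℓ count answer hc
      simp [solutionWhile, bFinish]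
      omega
  | cons d rest ih =>
      intro ℓ count answer hc
      by_cases h : ℓ ≥ d
      · rw [solutionWhile]
        simp only [h, if_pos]
        rw [ih ℓ (count + 1) answer (by omega), List.foldl_cons]
        have : bStep (answer, ℓ, count + 1) d = (answer, ℓ, count + 1 + 1) := by
          simp [bStep]; omega
        rw [this]
      · rw [solutionWhile]
        simp only [h, if_false]
        rw [ih d 0 (answer ++ [count + 1]) le_rfl, List.foldl_cons]
        have hd : ¬(¬count + 1 = 0 ∧ d ≤ ℓ) := by omega
        have hc' : ¬(count + 1 = 0) := by omega
        have : bStep (answer, ℓ, count + 1) d = (answer ++ [count + 1], d, 1) := by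
          simp only [bStep]; rw [if_neg hd, if_pos hc']
        rw [this]; norm_num

lemma duration_eq (p s : List Int) (h : p.length ≤ s.length) :
    (PySem.List.pyRange 0 p.length 1).foldl
      (fun acc i =>
        acc ++ [-(PySem.Int.floordiv (PySem.List.pyGetD p i 0 - 100)
                                     (PySem.List.pyGetD s i 0))]) []
      = (p.zip s).map dcalc := by
  rw [PySem.List.foldl_append_singleton_eq_map]
  rw [PySem.List.pyRange_one]
  simp only [List.map_map]
  apply List.ext_getElem
  · simp; omega
  · intro i h1 h2
    have hip : i < p.length := by simp at h1; omega
    have his : i < s.length := by omega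
    simp [PySem.List.pyGetD_natCast, dcalc, List.getD_eq_getElem?_getD, hip, his]

theorem solution_spec : Claim_equal_solution := by
  intro p s _hd hpre
  unfold Spec_solution solution
  rw [solution_alt_eq, duration_eq p s hpre.1]
  cases hzip : (p.zip s).map dcalc with
  | nil => simp [solutionWhile, bFinish]
  | cons d ds =>
      rw [List.foldl_cons]
      have h0 : bStep ([], 0, 0) d = ([], d, 1) := by simp [bStep]
      rw [h0, key ds d 0 [] le_rfl]; norm_num
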